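-- pv_equiv track=rewrite | github.com/HARRIBO81/CCC-Soultions | CCC 2006/J3.py | time1
-- ===== SOURCE A (Python) =====
-- def time1(string):
--     counter = 0
--     '''part one'''
--     for i in range(len(string)):
--         c = string[i]
--         if c=="a" or c=="d" or c=="g" or c=="j" or c =="m" or c == "p" or c == "t" or c == "w":
--             counter += 1
--         elif c== "b" or c == "e" or c == "h" or c =="k" or c == "n" or c == "q" or c == "u" or c == "x":
--             counter+=2
--         elif c == "c" or c == "f" or c == "i" or c == "l" or c == "o" or c == "r" or c == "v" or c == "y":
--             counter+=3
--         else: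
--             counter += 4
--     return counter
-- ===== SOURCE B (Python) =====
-- def time1(string):
--     total = 4 * len(string)
--     for discount, letters in ((3, "adgjmptw"), (2, "behknqux"), (1, "cfilorvy")):
--         for ch in letters:
--             total -= discount * string.count(ch)
--     return total
-- ===== Notes on version B (the rewrite author's own statement) =====
-- stated objective: alternative
-- what changed: B inverts the arithmetic: it starts from 4*len(string) and subtracts per-letter discounts (3,2,1) times string.count(letter) for each of the 24 grouped keypad letters, instead of A's single pass classifying each character with a branch chain and accumulating its press value.
import Mathlib
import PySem

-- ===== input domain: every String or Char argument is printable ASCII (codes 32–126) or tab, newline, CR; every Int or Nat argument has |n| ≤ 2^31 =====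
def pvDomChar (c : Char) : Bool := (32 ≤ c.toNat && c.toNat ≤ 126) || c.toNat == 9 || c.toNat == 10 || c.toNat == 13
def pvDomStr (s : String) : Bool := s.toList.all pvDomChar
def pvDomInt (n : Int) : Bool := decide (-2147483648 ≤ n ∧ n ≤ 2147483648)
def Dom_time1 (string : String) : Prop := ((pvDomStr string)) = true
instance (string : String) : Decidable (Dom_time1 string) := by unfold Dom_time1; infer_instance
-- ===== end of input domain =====

-- B inverts the arithmetic: it starts from 4*len(string) and subtracts discount*count(letter) for
-- each grouped keypad letter, instead of A's per-character branch-chain accumulation; same cost.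

-- ===== PORT A =====
def time1 (string : String) : Int :=
  (PySem.List.pyRange 0 (PySem.Str.len string) 1).foldl
    (fun counter i =>
      let c := PySem.List.pyGetD string.toList i ' '   -- string[i]; i is always in range here
      if c = 'a' ∨ c = 'd' ∨ c = 'g' ∨ c = 'j' ∨ c = 'm' ∨ c = 'p' ∨ c = 't' ∨ c = 'w' then counter + 1
      else if c = 'b' ∨ c = 'e' ∨ c = 'h' ∨ c = 'k' ∨ c = 'n' ∨ c = 'q' ∨ c = 'u' ∨ c = 'x' then counter + 2
      else if c = 'c' ∨ c = 'f' ∨ c = 'i' ∨ c = 'l' ∨ c = 'o' ∨ c = 'r' ∨ c = 'v' ∨ c = 'y' then counter + 3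
      else counter + 4)
    0

-- ===== PORT B =====
def time1_alt (string : String) : Int :=
  [((3 : Int), "adgjmptw"), (2, "behknqux"), (1, "cfilorvy")].foldl
    (fun total dg =>
      dg.2.toList.foldl
        -- string.count(ch): exact via PySem.Chars.count on code points (Str.count s t = Chars.count s.toList t.toList)
        (fun t ch => t - dg.1 * (PySem.Chars.count string.toList [ch] : Int))
        total)
    (4 * PySem.Str.len string)

-- ===== PRECONDITION & SPEC =====
def Spec_time1 (string : String) (out : Int) : Prop := out = time1_alt string
instance (string : String) (out : Int) : Decidable (Spec_time1 string out) := by unfold Spec_time1; infer_instance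

-- ===== CLAIM (what is proved, stated in full; the proofs are below) =====
def Claim_equal_time1 : Prop := ∀ (string : String), Dom_time1 string → Spec_time1 string (time1 string)

-- ===== LEMMAS AND PROOFS =====

-- A's per-character press count as a function (proof-side abbreviation of A's branch chain)
def pvA (c : Char) : Int :=
  if c = 'a' ∨ c = 'd' ∨ c = 'g' ∨ c = 'j' ∨ c = 'm' ∨ c = 'p' ∨ c = 't' ∨ c = 'w' then 1
  else if c = 'b' ∨ c = 'e' ∨ c = 'h' ∨ c = 'k' ∨ c = 'n' ∨ c = 'q' ∨ c = 'u' ∨ c = 'x' then 2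
  else if c = 'c' ∨ c = 'f' ∨ c = 'i' ∨ c = 'l' ∨ c = 'o' ∨ c = 'r' ∨ c = 'v' ∨ c = 'y' then 3
  else 4

-- the per-character discount 4 - pvA, written with the same branch conditions
def pvD (c : Char) : Int :=
  if c = 'a' ∨ c = 'd' ∨ c = 'g' ∨ c = 'j' ∨ c = 'm' ∨ c = 'p' ∨ c = 't' ∨ c = 'w' then 3
  else if c = 'b' ∨ c = 'e' ∨ c = 'h' ∨ c = 'k' ∨ c = 'n' ∨ c = 'q' ∨ c = 'u' ∨ c = 'x' then 2
  else if c = 'c' ∨ c = 'f' ∨ c = 'i' ∨ c = 'l' ∨ c = 'o' ∨ c = 'r' ∨ c = 'v' ∨ c = 'y' then 1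
  else 0

lemma pvA_add_pvD (c : Char) : pvA c + pvD c = 4 := by
  unfold pvA pvD; split_ifs <;> norm_num

-- A's index loop is the fold of pvA over the characters
lemma time1_eq_foldl (string : String) :
    time1 string = string.toList.foldl (fun acc c => acc + pvA c) 0 := by
  unfold time1
  rw [PySem.Str.len_eq]
  rw [PySem.List.foldl_pyRange_zero_pyGetD' string.toList ' '
    (fun counter c =>
      if c = 'a' ∨ c = 'd' ∨ c = 'g' ∨ c = 'j' ∨ c = 'm' ∨ c = 'p' ∨ c = 't' ∨ c = 'w' then counter + 1
      else if c = 'b' ∨ c = 'e' ∨ c = 'h' ∨ c = 'k' ∨ c = 'n' ∨ c = 'q' ∨ c = 'u' ∨ c = 'x' then counter + 2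
      else if c = 'c' ∨ c = 'f' ∨ c = 'i' ∨ c = 'l' ∨ c = 'o' ∨ c = 'r' ∨ c = 'v' ∨ c = 'y' then counter + 3
      else counter + 4) 0]
  apply PySem.List.foldl_congr_mem
  intro acc c _
  simp only [pvA]
  split_ifs <;> rfl

-- Python's substring count for a single-character needle is the character count
lemma count_go_singleton (c : Char) :
    ∀ (l : List Char) (fuel acc : Nat), l.length ≤ fuel →
      PySem.Chars.count.go [c] fuel l acc = acc + l.count c := by
  intro l
  induction l with
  | nil =>
    intro fuel acc _
    cases fuel <;> simp [PySem.Chars.count.go]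
  | cons h t ih =>
    intro fuel acc hle
    cases fuel with
    | zero => simp at hle
    | succ n =>
      by_cases hc : c = h
      · subst hc
        simp only [PySem.Chars.count.go, List.isPrefixOf, BEq.rfl, Bool.true_and,
          if_pos, List.length_cons, List.drop_succ_cons, List.length_nil, List.drop_zero]
        rw [ih n (acc + 1) (by simpa using hle)]
        simp
        omega
      · have hpre : List.isPrefixOf [c] (h :: t) = false := by
          simp [List.isPrefixOf, hc]
        simp only [PySem.Chars.count.go, hpre, Bool.false_eq_true, if_false]
        rw [ih n acc (by simpa using hle)]
        simp [eq_comm, hc]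

lemma str_count_singleton (s : String) (c : Char) :
    PySem.Chars.count s.toList [c] = s.toList.count c := by
  unfold PySem.Chars.count
  simp only [List.isEmpty_cons, Bool.false_eq_true, if_false]
  simpa using count_go_singleton c s.toList s.toList.length 0 le_rfl

-- counting pairs two ways: sum over the string of table counts = sum over the table of string counts
lemma count_swap (g : List Char) :
    ∀ s : List Char, (s.map (fun c => (g.count c : Int))).sum
      = (g.map (fun l => (s.count l : Int))).sum := by
  intro s
  induction s with
  | nil => simp
  | cons c t ih =>
    have hstep : (g.map (fun l => (((c :: t).count l : Nat) : Int))).sum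
        = (g.map (fun l => ((t.count l : Int) + if (l == c) = true then 1 else 0))).sum := by
      apply congrArg
      apply List.map_congr_left
      intro l _
      rw [List.count_cons]
      push_cast
      split_ifs <;> simp_all
    rw [List.map_cons, List.sum_cons, ih, hstep,
      PySem.List.sum_map_add_int, PySem.List.sum_map_ite_one_zero]
    have : g.countP (· == c) = g.count c := rfl
    rw [this]
    ring

-- the sum of press values is 4·length minus the sum of discounts
lemma sum_pvA (s : List Char) :
    (s.map pvA).sum = 4 * (s.length : Int) - (s.map pvD).sum := by
  induction s with
  | nil => simp
  | cons c t ih =>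
    simp only [List.map_cons, List.sum_cons, List.length_cons, ih]
    have := pvA_add_pvD c
    push_cast
    omega

-- the discount of a character, via its count in each key-group string
lemma pvD_eq_counts (c : Char) :
    pvD c = 3 * ("adgjmptw".toList.count c : Int)
          + 2 * ("behknqux".toList.count c : Int)
          + ("cfilorvy".toList.count c : Int) := by
  by_cases hc : c ∈ ['a','b','c','d','e','f','g','h','i','j','k','l','m','n','o','p','q','r','t','u','v','w','x','y']
  · fin_cases hc <;> rfl
  · simp only [List.mem_cons, List.not_mem_nil, or_false] at hc
    push Not at hc
    obtain ⟨h1,h2,h3,h4,h5,h6,h7,h8,h9,h10,h11,h12,h13,h14,h15,h16,h17,h18,h19,h20,h21,h22,h23,h24⟩ := hc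
    have e1 : "adgjmptw".toList = ['a','d','g','j','m','p','t','w'] := rfl
    have e2 : "behknqux".toList = ['b','e','h','k','n','q','u','x'] := rfl
    have e3 : "cfilorvy".toList = ['c','f','i','l','o','r','v','y'] := rfl
    rw [e1, e2, e3]
    simp [pvD, eq_comm, h1,h2,h3,h4,h5,h6,h7,h8,h9,h10,h11,h12,h13,h14,h15,h16,h17,h18,h19,h20,h21,h22,h23,h24]

-- ===== VERDICT (by name: the statement is the Claim_ definition above) =====
theorem time1_spec : Claim_equal_time1 := by
  intro string _
  unfold Spec_time1 time1_alt
  simp only [List.foldl_cons, List.foldl_nil]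
  rw [time1_eq_foldl, PySem.List.foldl_add, zero_add, sum_pvA]
  have hD : (string.toList.map pvD).sum
      = 3 * (("adgjmptw".toList.map (fun l => (string.toList.count l : Int))).sum)
      + 2 * (("behknqux".toList.map (fun l => (string.toList.count l : Int))).sum)
      + (("cfilorvy".toList.map (fun l => (string.toList.count l : Int))).sum) := by
    have hpt : (string.toList.map pvD).sum
        = (string.toList.map (fun c =>
            3 * ("adgjmptw".toList.count c : Int)
          + 2 * ("behknqux".toList.count c : Int)
          + ("cfilorvy".toList.count c : Int))).sum := by
      apply congrArg
      exact List.map_congr_left (fun c _ => pvD_eq_counts c)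
    rw [hpt, PySem.List.sum_map_add_int, PySem.List.sum_map_add_int]
    rw [show (fun c => 3 * ("adgjmptw".toList.count c : Int)) = (fun c => ("adgjmptw".toList.count c : Int) * 3) from by funext c; ring]
    rw [show (fun c => 2 * ("behknqux".toList.count c : Int)) = (fun c => ("behknqux".toList.count c : Int) * 2) from by funext c; ring]
    rw [List.sum_map_mul_right, List.sum_map_mul_right,
        count_swap "adgjmptw".toList string.toList,
        count_swap "behknqux".toList string.toList,
        count_swap "cfilorvy".toList string.toList]
    ring
  rw [hD]
  simp only [str_count_singleton, PySem.Str.len_eq]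
  have g1 : "adgjmptw".toList = ['a','d','g','j','m','p','t','w'] := rfl
  have g2 : "behknqux".toList = ['b','e','h','k','n','q','u','x'] := rfl
  have g3 : "cfilorvy".toList = ['c','f','i','l','o','r','v','y'] := rfl
  rw [g1, g2, g3]
  simp only [List.map_cons, List.map_nil, List.sum_cons, List.sum_nil,
    List.foldl_cons, List.foldl_nil]
  ring
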